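-- pv_equiv track=rewrite | github.com/rhoitjadhav/competitive-programming-practice | codesignal/archive/arcade/intro/Different Squares.py | differentSquares
-- ===== SOURCE A (Python) =====
-- def differentSquares(matrix):
--     n = len(matrix)
--     m = len(matrix[0])
--
--     if n < 2 or m < 2:
--         return 0
--
--     st = set()
--     for i in range(n-1):
--         for j in range(m-1):
--             row = []
--             for k in range(i, i + 2):
--                 col = []
--                 for l in range(j, j + 2):
--                     col.append(matrix[k][l])
--                 row.append(tuple(col))
--             st.add(tuple(row))
--
--     return len(st)
-- ===== SOURCE B (Python) =====
-- def differentSquares(matrix):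
--     # Encodes each 2x2 window as one packed integer key (entries fit in |v| <= 2**31),
--     # then sorts the keys and counts distinct by one pass over adjacent pairs,
--     # instead of hashing window tuples into a set.
--     n = len(matrix)
--     m = len(matrix[0])
--     if n < 2 or m < 2:
--         return 0
--     S = 1 << 33
--     keys = []
--     for i in range(n - 1):
--         row0 = matrix[i]
--         row1 = matrix[i + 1]
--         for j in range(m - 1):
--             keys.append(((row0[j] * S + row0[j + 1]) * S + row1[j]) * S + row1[j + 1])
--     keys.sort()
--     distinct = 1
--     prev = keys[0]
--     for x in keys[1:]:
--         if x != prev: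
--             distinct += 1
--         prev = x
--     return distinct
-- ===== Notes on version B (the rewrite author's own statement) =====
-- stated objective: alternative
-- what changed: Replaces hash-set deduplication of nested 2x2 window tuples by packing each window into a single integer key (base 2^33, valid since |entry| <= 2^31), sorting the keys and counting distinct elements in one adjacent-comparison pass; the packed int keys avoid per-window tuple allocation and hashing.
import Mathlib
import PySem

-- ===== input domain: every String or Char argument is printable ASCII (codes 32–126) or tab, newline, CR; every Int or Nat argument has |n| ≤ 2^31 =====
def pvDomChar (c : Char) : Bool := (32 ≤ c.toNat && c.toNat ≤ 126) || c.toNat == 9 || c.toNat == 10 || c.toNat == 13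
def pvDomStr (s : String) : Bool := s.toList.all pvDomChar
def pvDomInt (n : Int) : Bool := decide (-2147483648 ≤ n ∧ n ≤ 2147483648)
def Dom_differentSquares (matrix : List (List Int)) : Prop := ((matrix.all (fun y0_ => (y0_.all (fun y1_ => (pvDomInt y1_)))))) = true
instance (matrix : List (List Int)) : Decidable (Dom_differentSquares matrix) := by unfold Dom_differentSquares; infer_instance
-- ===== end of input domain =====

-- B packs each 2x2 window into one integer key (base 2^33; sound since |entry| ≤ 2^31 on Dom),
-- sorts the keys and counts distinct elements in one adjacent-comparison pass, instead of
-- hash-set deduplication of nested window tuples; same result, no speed claim.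

-- ===== PORT A =====
-- Python tuple(col)/tuple(row) are built from runtime lists, so windows stay List (List Int).
def differentSquares (matrix : List (List Int)) : Int :=
  let n : Int := matrix.length
  let m : Int := (PySem.List.pyGetD matrix 0 []).length
  if n < 2 ∨ m < 2 then 0 else
  let st : PySem.Set (List (List Int)) :=
    (PySem.List.pyRange 0 (n-1) 1).foldl (fun st i =>
      (PySem.List.pyRange 0 (m-1) 1).foldl (fun st j =>
        let row := (PySem.List.pyRange i (i+2) 1).foldl (fun row k =>
          let col := (PySem.List.pyRange j (j+2) 1).foldl (fun col l =>
            col ++ [PySem.List.pyGetD (PySem.List.pyGetD matrix k []) l 0]) []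
          row ++ [col]) []
        PySem.Set.add st row) st) PySem.Set.empty
  (PySem.Set.len st : Int)

-- ===== PORT B =====
def differentSquares_alt (matrix : List (List Int)) : Int :=
  let n : Int := matrix.length
  let m : Int := (PySem.List.pyGetD matrix 0 []).length
  if n < 2 ∨ m < 2 then 0 else
  let S : Int := 2^33
  let keys : List Int :=
    (PySem.List.pyRange 0 (n-1) 1).foldl (fun keys i =>
      let row0 := PySem.List.pyGetD matrix i []
      let row1 := PySem.List.pyGetD matrix (i+1) []
      (PySem.List.pyRange 0 (m-1) 1).foldl (fun keys j =>
        keys ++ [((PySem.List.pyGetD row0 j 0 * S + PySem.List.pyGetD row0 (j+1) 0) * S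
                   + PySem.List.pyGetD row1 j 0) * S + PySem.List.pyGetD row1 (j+1) 0]) keys) []
  let skeys := PySem.List.sorted keys (fun x => x) false
  -- keys is nonempty here ((n-1)*(m-1) ≥ 1 windows), so keys[0] is in range
  let res := (PySem.List.slice skeys (some 1) none).foldl
      (fun (sp : Int × Int) x => (if x ≠ sp.2 then sp.1 + 1 else sp.1, x))
      (1, PySem.List.pyGetD skeys 0 0)
  res.1

-- ===== PRECONDITION & SPEC =====
-- Pre_ excludes exactly the inputs where A raises: the empty matrix (matrix[0] is an
-- IndexError) and, when n ≥ 2 and m ≥ 2, ragged matrices with some row shorter than row 0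
-- (matrix[k][l] is an IndexError).
def Pre_differentSquares (matrix : List (List Int)) : Prop :=
  matrix ≠ [] ∧
  (2 ≤ matrix.length ∧ 2 ≤ matrix.headI.length →
    ∀ row ∈ matrix, matrix.headI.length ≤ row.length)
instance (matrix : List (List Int)) : Decidable (Pre_differentSquares matrix) := by
  unfold Pre_differentSquares; infer_instance
def pvWitness_differentSquares : List (List Int) := [[1, 2], [3, 4]]
def Spec_differentSquares (matrix : List (List Int)) (out : Int) : Prop := out = differentSquares_alt matrix
instance (matrix : List (List Int)) (out : Int) : Decidable (Spec_differentSquares matrix out) := by unfold Spec_differentSquares; infer_instance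

-- ===== CLAIM (what is proved, stated in full; the proofs are below) =====
def Claim_equal_differentSquares : Prop := ∀ (matrix : List (List Int)), Dom_differentSquares matrix → Pre_differentSquares matrix → Spec_differentSquares matrix (differentSquares matrix)

-- ===== LEMMAS AND PROOFS =====

-- window of A at (i, j), and B's packed key
def pvWin (matrix : List (List Int)) (i j : Int) : List (List Int) :=
  [[PySem.List.pyGetD (PySem.List.pyGetD matrix i []) j 0,
    PySem.List.pyGetD (PySem.List.pyGetD matrix i []) (j+1) 0],
   [PySem.List.pyGetD (PySem.List.pyGetD matrix (i+1) []) j 0,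
    PySem.List.pyGetD (PySem.List.pyGetD matrix (i+1) []) (j+1) 0]]

def pvPack (w : List (List Int)) : Int :=
  ((w.headI.headI * 2^33 + (w.headI.getD 1 0)) * 2^33
     + (w.getD 1 []).headI) * 2^33 + ((w.getD 1 []).getD 1 0)

-- the flat list of windows, in loop order
def pvWins (matrix : List (List Int)) (n m : Int) : List (List (List Int)) :=
  (PySem.List.pyRange 0 (n-1) 1).flatMap (fun i =>
    (PySem.List.pyRange 0 (m-1) 1).map (fun j => pvWin matrix i j))

theorem pvRange_two (a : Int) : PySem.List.pyRange a (a+2) 1 = [a, a+1] := by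
  rw [PySem.List.pyRange_one_cons (by omega), PySem.List.pyRange_one_cons (by omega),
      PySem.List.pyRange_one_eq_nil (by omega)]

-- A's set-building loop collects exactly the windows
theorem pvA_foldl_update (l : List Int) (f : Int → List (List (List Int)))
    (s : PySem.Set (List (List Int))) :
    l.foldl (fun s x => PySem.Set.update s (f x)) s = PySem.Set.update s (l.flatMap f) := by
  induction l generalizing s with
  | nil => simp [List.flatMap]
  | cons x t ih =>
      rw [List.foldl_cons, List.flatMap_cons, ih]
      simp only [PySem.Set.update, List.foldl_append]

theorem pvA_st (matrix : List (List Int)) (n m : Int) :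
    (PySem.List.pyRange 0 (n-1) 1).foldl (fun st i =>
      (PySem.List.pyRange 0 (m-1) 1).foldl (fun st j =>
        let row := (PySem.List.pyRange i (i+2) 1).foldl (fun row k =>
          let col := (PySem.List.pyRange j (j+2) 1).foldl (fun col l =>
            col ++ [PySem.List.pyGetD (PySem.List.pyGetD matrix k []) l 0]) []
          row ++ [col]) []
        PySem.Set.add st row) st) PySem.Set.empty
    = PySem.Set.ofList (pvWins matrix n m) := by
  have hinner : ∀ (st : PySem.Set (List (List Int))) (i : Int),
      (PySem.List.pyRange 0 (m-1) 1).foldl (fun st j =>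
        let row := (PySem.List.pyRange i (i+2) 1).foldl (fun row k =>
          let col := (PySem.List.pyRange j (j+2) 1).foldl (fun col l =>
            col ++ [PySem.List.pyGetD (PySem.List.pyGetD matrix k []) l 0]) []
          row ++ [col]) []
        PySem.Set.add st row) st
      = PySem.Set.update st ((PySem.List.pyRange 0 (m-1) 1).map (fun j => pvWin matrix i j)) := by
    intro st i
    rw [PySem.Set.update, List.foldl_map]
    apply PySem.List.foldl_congr_mem
    intro s j _
    simp only [pvRange_two, List.foldl_cons, List.foldl_nil, List.nil_append, pvWin]
    rfl
  calc _ = (PySem.List.pyRange 0 (n-1) 1).foldl (fun st i =>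
            PySem.Set.update st ((PySem.List.pyRange 0 (m-1) 1).map (fun j => pvWin matrix i j)))
            PySem.Set.empty := by
            apply PySem.List.foldl_congr_mem; intro s i _; exact hinner s i
    _ = _ := by
          rw [pvA_foldl_update]
          rfl

-- B's key-building loop collects exactly the packed windows
theorem pvB_keys (matrix : List (List Int)) (n m : Int) :
    (PySem.List.pyRange 0 (n-1) 1).foldl (fun keys i =>
      (PySem.List.pyRange 0 (m-1) 1).foldl (fun keys j =>
        keys ++ [((PySem.List.pyGetD (PySem.List.pyGetD matrix i []) j 0 * 2^33
                    + PySem.List.pyGetD (PySem.List.pyGetD matrix i []) (j+1) 0) * 2^33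
                   + PySem.List.pyGetD (PySem.List.pyGetD matrix (i+1) []) j 0) * 2^33
                  + PySem.List.pyGetD (PySem.List.pyGetD matrix (i+1) []) (j+1) 0]) keys) []
    = (pvWins matrix n m).map pvPack := by
  calc _ = (PySem.List.pyRange 0 (n-1) 1).foldl (fun keys i =>
            keys ++ (PySem.List.pyRange 0 (m-1) 1).map (fun j => pvPack (pvWin matrix i j))) [] := by
          apply PySem.List.foldl_congr_mem
          intro acc i _
          exact PySem.List.foldl_append_singleton_eq_map _ _ _
    _ = _ := by
          rw [PySem.List.foldl_append_eq_flatMap, List.nil_append, pvWins, List.map_flatMap]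
          simp [Function.comp_def]

-- a pyGetD value is an element of the list or the default
theorem pvGetD_mem_or {α : Type} (xs : List α) (i : Int) (d : α) :
    PySem.List.pyGetD xs i d ∈ xs ∨ PySem.List.pyGetD xs i d = d := by
  simp only [PySem.List.pyGetD, PySem.List.pyGet?]
  rcases PySem.List.pyIdx? xs.length i with _ | k
  · right; rfl
  · rcases h : xs[k]? with _ | x
    · right; simp [h]
    · left; simp only [Option.bind_some, h, Option.getD_some]; exact List.mem_of_getElem? h

-- on Dom every (defaulted) entry lookup is bounded by 2^31
theorem pvEntry_bound (matrix : List (List Int)) (hDom : Dom_differentSquares matrix)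
    (k l : Int) :
    -2147483648 ≤ PySem.List.pyGetD (PySem.List.pyGetD matrix k []) l 0 ∧
      PySem.List.pyGetD (PySem.List.pyGetD matrix k []) l 0 ≤ 2147483648 := by
  have hD : ∀ row ∈ matrix, ∀ v ∈ row, -2147483648 ≤ v ∧ v ≤ 2147483648 := by
    simp only [Dom_differentSquares, List.all_eq_true, pvDomInt, decide_eq_true_eq] at hDom
    exact hDom
  rcases pvGetD_mem_or matrix k [] with hrow | hrow
  · rcases pvGetD_mem_or (PySem.List.pyGetD matrix k []) l 0 with hv | hv
    · exact hD _ hrow _ hv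
    · rw [hv]; omega
  · rw [hrow]
    rcases pvGetD_mem_or ([] : List Int) l 0 with hv | hv
    · cases hv
    · rw [hv]; omega

-- every collected window is some pvWin
theorem pvMem_wins (matrix : List (List Int)) (n m : Int) (w : List (List Int))
    (hw : w ∈ pvWins matrix n m) : ∃ i j, w = pvWin matrix i j := by
  simp only [pvWins, List.mem_flatMap, List.mem_map] at hw
  obtain ⟨i, -, j, -, rfl⟩ := hw
  exact ⟨i, j, rfl⟩

-- packing is injective on the collected windows (entries bounded by 2^31)
theorem pvPack_injOn (matrix : List (List Int)) (hDom : Dom_differentSquares matrix)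
    (n m : Int) : Set.InjOn pvPack ↑(pvWins matrix n m).toFinset := by
  intro w hw w' hw' hp
  simp only [List.mem_toFinset, Finset.mem_coe] at hw hw'
  obtain ⟨i, j, rfl⟩ := pvMem_wins matrix n m w hw
  obtain ⟨i', j', rfl⟩ := pvMem_wins matrix n m w' hw'
  have hS : (2:Int)^33 = 8589934592 := by norm_num
  simp only [pvPack, pvWin, List.headI, List.getD, List.getElem?_cons_zero,
    List.getElem?_cons_succ, Option.getD_some, hS] at hp
  have h1 := pvEntry_bound matrix hDom i j
  have h2 := pvEntry_bound matrix hDom i (j+1)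
  have h3 := pvEntry_bound matrix hDom (i+1) j
  have h4 := pvEntry_bound matrix hDom (i+1) (j+1)
  have h1' := pvEntry_bound matrix hDom i' j'
  have h2' := pvEntry_bound matrix hDom i' (j'+1)
  have h3' := pvEntry_bound matrix hDom (i'+1) j'
  have h4' := pvEntry_bound matrix hDom (i'+1) (j'+1)
  have hcomp : PySem.List.pyGetD (PySem.List.pyGetD matrix i []) j 0
          = PySem.List.pyGetD (PySem.List.pyGetD matrix i' []) j' 0 ∧
         PySem.List.pyGetD (PySem.List.pyGetD matrix i []) (j+1) 0
          = PySem.List.pyGetD (PySem.List.pyGetD matrix i' []) (j'+1) 0 ∧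
         PySem.List.pyGetD (PySem.List.pyGetD matrix (i+1) []) j 0
          = PySem.List.pyGetD (PySem.List.pyGetD matrix (i'+1) []) j' 0 ∧
         PySem.List.pyGetD (PySem.List.pyGetD matrix (i+1) []) (j+1) 0
          = PySem.List.pyGetD (PySem.List.pyGetD matrix (i'+1) []) (j'+1) 0 := by
    omega
  simp only [pvWin, hcomp.1, hcomp.2.1, hcomp.2.2.1, hcomp.2.2.2]

-- the size of a Python set is the number of distinct elements
theorem pvSetLen_eq_card {α : Type} [DecidableEq α] [BEq α] [LawfulBEq α] (xs : List α) :
    PySem.Set.len (PySem.Set.ofList xs) = (xs.toFinset.card : Int) := by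
  have hn : (PySem.Set.ofList xs : List α).Nodup := PySem.Set.nodup_ofList xs
  have hf : (PySem.Set.ofList xs : List α).toFinset = xs.toFinset := by
    ext y; simp [PySem.Set.mem_ofList]
  have hl := List.toFinset_card_of_nodup hn
  rw [hf] at hl
  simp only [PySem.Set.len, ← hl]

-- B's adjacent-comparison pass over a ≤-sorted chain counts distinct elements
theorem pvScan (t : List Int) (p c : Int) (h : (p :: t).Pairwise (· ≤ ·)) :
    (t.foldl (fun (sp : Int × Int) x => (if x ≠ sp.2 then sp.1 + 1 else sp.1, x)) (c, p)).1
      = c + ((p :: t).toFinset.card : Int) - 1 := by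
  induction t generalizing p c with
  | nil => simp
  | cons y t ih =>
      have hpy : p ≤ y := (List.pairwise_cons.1 h).1 y (by simp)
      have hchain : (y :: t).Pairwise (· ≤ ·) := (List.pairwise_cons.1 h).2
      rw [List.foldl_cons]
      have hstep : ((if y ≠ (c, p).2 then (c, p).1 + 1 else (c, p).1, y) : Int × Int)
          = (if y ≠ p then c + 1 else c, y) := rfl
      rw [hstep]
      by_cases hyp : y = p
      · subst hyp
        rw [if_neg (by simp), ih y c hchain]
        congr 2
        simp
      · rw [if_pos hyp, ih y (c+1) hchain]
        have hnotmem : p ∉ (y :: t).toFinset := by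
          simp only [List.mem_toFinset]
          intro hmem
          rcases List.mem_cons.1 hmem with rfl | hmem'
          · exact hyp rfl
          · have hyle : y ≤ p := (List.pairwise_cons.1 hchain).1 p hmem'
            exact hyp (le_antisymm hyle hpy)
        rw [show ((p :: y :: t).toFinset) = insert p (y :: t).toFinset from by simp,
            Finset.card_insert_of_notMem hnotmem]
        push_cast
        ring

-- map and toFinset commute
theorem pvToFinset_map (l : List (List (List Int))) (f : List (List Int) → Int) :
    (l.map f).toFinset = l.toFinset.image f := by
  ext x; simp

-- ===== VERDICT (by name: the statement is the Claim_ definition above) =====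
theorem differentSquares_spec : Claim_equal_differentSquares := by
  intro matrix hDom hPre
  unfold Spec_differentSquares
  simp only [differentSquares, differentSquares_alt]
  by_cases hc : ((matrix.length : Int) < 2 ∨ ((PySem.List.pyGetD matrix 0 []).length : Int) < 2)
  · simp only [if_pos hc]
  · simp only [if_neg hc]
    rw [not_or, not_lt, not_lt] at hc
    set n : Int := (matrix.length : Int) with hn
    set m : Int := ((PySem.List.pyGetD matrix 0 []).length : Int) with hm
    set W := pvWins matrix n m with hW
    rw [pvA_st matrix n m, pvB_keys matrix n m, pvSetLen_eq_card]
    set keys := W.map pvPack with hkeys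
    have hWne : W ≠ [] := by
      have h00 : pvWin matrix 0 0 ∈ W := by
        rw [hW]
        simp only [pvWins, List.mem_flatMap, List.mem_map]
        exact ⟨0, (PySem.List.mem_pyRange_one).2 (by omega), 0,
               (PySem.List.mem_pyRange_one).2 (by omega), rfl⟩
      exact List.ne_nil_of_mem h00
    have hkne : keys ≠ [] := by
      rw [hkeys]; simpa using hWne
    have hskne : PySem.List.sorted keys (fun x => x) false ≠ [] := by
      rw [ne_eq, PySem.List.sorted_eq_nil_iff]; exact hkne
    obtain ⟨h0, t, hsk⟩ := List.exists_cons_of_ne_nil hskne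
    have hchain : (h0 :: t).Pairwise (· ≤ ·) := by
      rw [← hsk]
      exact PySem.List.sorted_pairwise keys (fun x => x)
    rw [hsk, PySem.List.slice_from_one]
    have hget0 : PySem.List.pyGetD (h0 :: t) (0 : Int) 0 = h0 := by
      simp [PySem.List.pyGetD, PySem.List.pyGet?, PySem.List.pyIdx?]
    rw [List.tail_cons, hget0, pvScan t h0 1 hchain]
    have hperm : (h0 :: t).toFinset = keys.toFinset := by
      apply List.toFinset_eq_of_perm
      rw [← hsk]
      exact PySem.List.sorted_perm keys (fun x => x) false
    rw [hperm, hkeys, pvToFinset_map,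
        Finset.card_image_of_injOn (pvPack_injOn matrix hDom n m)]
    ring
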